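-- pv_equiv track=rewrite | github.com/zhongxiang117/pyBOSS | pyBOSS/utils.py | _separator
-- ===== SOURCE A (Python) =====
-- def _separator(prolines):
--     before = after = len(prolines)
--     bo = True
--     for i,l in enumerate(prolines):
--         if bo:
--             if len(l) < 4 or l[:4] == '    ':
--                 bo = False
--                 before = i
--         else:
--             if not (len(l) < 4 or l[:4] == '    '):
--                 after = i
--                 break
--     return (before,after)
-- ===== SOURCE B (Python) =====
-- def _p(l):
--     return len(l) < 4 or l[:4] == '    '
--
-- def _separator(prolines):
--     n = len(prolines)
--     before = next((i for i, l in enumerate(prolines) if _p(l)), n)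
--     after = next((i for i, l in enumerate(prolines) if i > before and not _p(l)), n)
--     return (before, after)
-- ===== Notes on version B (the rewrite author's own statement) =====
-- stated objective: idiomatic
-- what changed: Replaces the single stateful loop with a bo flag and break by a shared predicate and two declarative next()/generator searches (first matching index, then first later non-matching index).
import Mathlib
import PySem

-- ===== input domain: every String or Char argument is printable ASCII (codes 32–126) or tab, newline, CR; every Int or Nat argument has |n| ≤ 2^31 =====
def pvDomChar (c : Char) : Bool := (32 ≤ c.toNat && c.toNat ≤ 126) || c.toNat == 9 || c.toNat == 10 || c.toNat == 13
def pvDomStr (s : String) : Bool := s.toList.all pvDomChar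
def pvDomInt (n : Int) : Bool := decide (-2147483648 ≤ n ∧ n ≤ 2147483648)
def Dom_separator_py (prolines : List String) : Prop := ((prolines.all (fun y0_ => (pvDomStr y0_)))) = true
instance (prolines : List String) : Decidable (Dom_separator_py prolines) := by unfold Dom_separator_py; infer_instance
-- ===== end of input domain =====

-- B replaces A's single stateful loop (bo flag + break) by a shared predicate and two
-- declarative first-index searches; objective: idiomatic, same O(n) cost.

-- ===== PORT A =====
-- One loop over enumerate(prolines) carrying (before, after, bo), breaking on the first
-- non-separator line after the separator region started; condition inlined as in A.
def sepLoopA : List String → Int → Int → Int → Bool → Int × Int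
  | [], _, before, after, _ => (before, after)
  | l :: rest, i, before, after, bo =>
    if bo then
      if decide (PySem.Str.len l < 4) || (PySem.Str.slice l none (some 4) == "    ") then
        sepLoopA rest (i + 1) i after false
      else
        sepLoopA rest (i + 1) before after bo
    else
      if !(decide (PySem.Str.len l < 4) || (PySem.Str.slice l none (some 4) == "    ")) then
        (before, i)
      else
        sepLoopA rest (i + 1) before after bo

def separator_py (prolines : List String) : Int × Int :=
  sepLoopA prolines 0 (prolines.length : Int) (prolines.length : Int) true

-- ===== PORT B =====
-- shared predicate p(l) = len(l) < 4 or l[:4] == '    '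
def sepP (l : String) : Bool :=
  decide (PySem.Str.len l < 4) || (PySem.Str.slice l none (some 4) == "    ")

-- next((i for i,l in enumerate(ls) if q i l), default none): first index satisfying q
def findIdxQ (q : Int → String → Bool) : List String → Int → Option Int
  | [], _ => none
  | l :: rest, i => if q i l then some i else findIdxQ q rest (i + 1)

def separator_py_alt (prolines : List String) : Int × Int :=
  let n : Int := prolines.length
  let before := (findIdxQ (fun _ l => sepP l) prolines 0).getD n
  let after := (findIdxQ (fun i l => decide (before < i) && !sepP l) prolines 0).getD n
  (before, after)

-- ===== PRECONDITION & SPEC =====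
def Spec_separator_py (prolines : List String) (out : Int × Int) : Prop := out = separator_py_alt prolines
instance (prolines : List String) (out : Int × Int) : Decidable (Spec_separator_py prolines out) := by unfold Spec_separator_py; infer_instance

-- ===== CLAIM (what is proved, stated in full; the proofs are below) =====
def Claim_equal_separator_py : Prop := ∀ (prolines : List String), Dom_separator_py prolines → Spec_separator_py prolines (separator_py prolines)

-- ===== LEMMAS AND PROOFS =====

theorem findIdxQ_cons (q : Int → String → Bool) (l : String) (rest : List String) (i : Int) :
    findIdxQ q (l :: rest) i = if q i l then some i else findIdxQ q rest (i + 1) := rfl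

theorem sepLoopA_cons_true (l : String) (rest : List String) (i b a : Int) :
    sepLoopA (l :: rest) i b a true =
      if sepP l then sepLoopA rest (i + 1) i a false else sepLoopA rest (i + 1) b a true := rfl

theorem sepLoopA_cons_false (l : String) (rest : List String) (i b a : Int) :
    sepLoopA (l :: rest) i b a false =
      if !sepP l then (b, i) else sepLoopA rest (i + 1) b a false := rfl

-- any index returned by findIdxQ is ≥ the start index
theorem findIdxQ_ge (q : Int → String → Bool) :
    ∀ (ls : List String) (i j : Int), findIdxQ q ls i = some j → i ≤ j := by
  intro ls
  induction ls with
  | nil => intro i j h; simp [findIdxQ] at h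
  | cons l rest ih =>
    intro i j h
    rw [findIdxQ_cons] at h
    split at h
    · injection h with h; omega
    · have := ih (i + 1) j h; omega

-- once bound < i, the bound filter is vacuous
theorem findIdxQ_skip (bound : Int) :
    ∀ (ls : List String) (i : Int), bound < i →
      findIdxQ (fun k l => decide (bound < k) && !sepP l) ls i
        = findIdxQ (fun _ l => !sepP l) ls i := by
  intro ls
  induction ls with
  | nil => intro i _; rfl
  | cons l rest ih =>
    intro i hi
    simp only [findIdxQ_cons, decide_eq_true hi, Bool.true_and]
    split
    · rfl
    · exact ih (i + 1) (by omega)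

-- the bound filter never fires if every scanned index stays ≤ bound
theorem findIdxQ_none (bound : Int) :
    ∀ (ls : List String) (i : Int), i + ls.length ≤ bound + 1 →
      findIdxQ (fun k l => decide (bound < k) && !sepP l) ls i = none := by
  intro ls
  induction ls with
  | nil => intro i _; rfl
  | cons l rest ih =>
    intro i hi
    simp only [List.length_cons] at hi
    have hb : decide (bound < i) = false := by simp; omega
    simp only [findIdxQ_cons, hb, Bool.false_and, Bool.false_eq_true, if_false]
    exact ih (i + 1) (by omega)

-- phase 2 of A's loop (bo = False): first non-separator index, default after
theorem sepLoopA_false :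
    ∀ (ls : List String) (i b a : Int),
      sepLoopA ls i b a false = (b, (findIdxQ (fun _ l => !sepP l) ls i).getD a) := by
  intro ls
  induction ls with
  | nil => intro i b a; rfl
  | cons l rest ih =>
    intro i b a
    rw [sepLoopA_cons_false]
    simp only [findIdxQ_cons]
    by_cases h : sepP l = true
    · rw [if_neg (by simp [h]), if_neg (by simp [h])]
      exact ih (i + 1) b a
    · rw [if_pos (by simp [h]), if_pos (by simp [h])]
      rfl

-- phase 1 of A's loop (bo = True) against B's two searches
theorem sepLoopA_true :
    ∀ (ls : List String) (i b a : Int),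
      sepLoopA ls i b a true =
        match findIdxQ (fun _ l => sepP l) ls i with
        | none => (b, a)
        | some j => (j, (findIdxQ (fun k l => decide (j < k) && !sepP l) ls i).getD a) := by
  intro ls
  induction ls with
  | nil => intro i b a; rfl
  | cons l rest ih =>
    intro i b a
    rw [sepLoopA_cons_true]
    by_cases h : sepP l = true
    · rw [if_pos h, sepLoopA_false]
      have h1 : findIdxQ (fun _ l => sepP l) (l :: rest) i = some i := by
        rw [findIdxQ_cons]; simp [h]
      have h2 : findIdxQ (fun k l' => decide (i < k) && !sepP l') (l :: rest) i
          = findIdxQ (fun _ l => !sepP l) rest (i + 1) := by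
        rw [findIdxQ_cons, if_neg (by simp), findIdxQ_skip i rest (i + 1) (by omega)]
      rw [h1]
      show (i, (findIdxQ (fun _ l => !sepP l) rest (i + 1)).getD a)
          = (i, (findIdxQ (fun k l' => decide (i < k) && !sepP l') (l :: rest) i).getD a)
      rw [h2]
    · rw [if_neg h, ih]
      have h1 : findIdxQ (fun _ l => sepP l) (l :: rest) i
          = findIdxQ (fun _ l => sepP l) rest (i + 1) := by
        rw [findIdxQ_cons, if_neg h]
      rw [h1]
      cases hf : findIdxQ (fun _ l => sepP l) rest (i + 1) with
      | none => rfl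
      | some j =>
        have hij : i + 1 ≤ j := findIdxQ_ge _ rest (i + 1) j hf
        have h2 : findIdxQ (fun k l' => decide (j < k) && !sepP l') (l :: rest) i
            = findIdxQ (fun k l' => decide (j < k) && !sepP l') rest (i + 1) := by
          rw [findIdxQ_cons, if_neg (by simp [h]; omega)]
        show (j, (findIdxQ (fun k l' => decide (j < k) && !sepP l') rest (i + 1)).getD a)
            = (j, (findIdxQ (fun k l' => decide (j < k) && !sepP l') (l :: rest) i).getD a)
        rw [h2]

-- ===== VERDICT (by name: the statement is the Claim_ definition above) =====
theorem separator_py_spec : Claim_equal_separator_py := by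
  intro prolines _
  unfold Spec_separator_py separator_py separator_py_alt
  rw [sepLoopA_true]
  cases hf : findIdxQ (fun _ l => sepP l) prolines 0 with
  | none =>
    show ((prolines.length : Int), (prolines.length : Int))
        = ((prolines.length : Int),
           (findIdxQ (fun i l => decide ((prolines.length : Int) < i) && !sepP l) prolines 0).getD
             (prolines.length : Int))
    rw [findIdxQ_none ((prolines.length : Int)) prolines 0 (by omega)]
    rfl
  | some j =>
    rfl
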